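-- pv_equiv track=rewrite | github.com/imdigitaljim/School_Code | Pattern Recognition/adaboosting.py | build_class_table
-- ===== SOURCE A (Python) =====
-- def build_class_table(samples):
--     data_set = {}
--     keys = set()
--     for sample in samples:
--         key = int(sample[0])
--         keys.add(key)
--         if key in data_set:
--             data_set[key] += [sample]
--         else:
--             data_set[key] = [sample]
--     return data_set, keys
-- ===== SOURCE B (Python) =====
-- def build_class_table(samples):
--     firsts = [int(s[0]) for s in samples]
--     order = list(dict.fromkeys(firsts))
--     data_set = {k: [s for f, s in zip(firsts, samples) if f == k] for k in order}
--     return data_set, set(order)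
-- ===== Notes on version B (the rewrite author's own statement) =====
-- stated objective: alternative
-- what changed: A builds the groups in one pass that accumulates a dict and a set per sample; B computes all keys once, dedups them in first-occurrence order, and then builds each group by a separate filter pass over the samples (set = the deduped keys).
import Mathlib
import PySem

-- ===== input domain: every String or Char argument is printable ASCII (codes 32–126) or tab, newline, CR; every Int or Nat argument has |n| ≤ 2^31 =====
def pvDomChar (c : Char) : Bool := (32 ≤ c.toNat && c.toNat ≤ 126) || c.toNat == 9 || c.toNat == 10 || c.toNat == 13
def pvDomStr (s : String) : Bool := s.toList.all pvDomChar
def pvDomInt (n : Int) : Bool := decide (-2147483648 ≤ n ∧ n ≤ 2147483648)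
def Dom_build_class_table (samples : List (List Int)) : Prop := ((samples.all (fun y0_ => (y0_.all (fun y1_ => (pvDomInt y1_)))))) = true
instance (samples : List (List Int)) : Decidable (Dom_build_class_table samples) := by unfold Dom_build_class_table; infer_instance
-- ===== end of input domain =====

-- B replaces A's single-pass dict accumulation by dedup-the-keys then one filter pass per distinct key (alternative decomposition, same results).

-- ===== PORT A =====
-- A's single pass: for each sample, key = int(sample[0]); add key to the set; append the sample to data_set[key] (creating the entry on first sight).
def build_class_table (samples : List (List Int)) : (List (Int × List (List Int))) × List Int :=
  let st := samples.foldl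
    (fun (acc : PySem.Dict Int (List (List Int)) × PySem.Set Int) sample =>
      -- key = int(sample[0]); sample[0] is already an int; Pre_ excludes empty samples (IndexError)
      let key : Int := (PySem.List.pyGet? sample 0).getD 0
      let keys := PySem.Set.add acc.2 key
      let d := acc.1
      if d.contains key then (d.insert key (d.getD key [] ++ [sample]), keys)
      else (d.insert key [sample], keys))
    (PySem.Dict.empty, PySem.Set.empty)
  (st.1.items, st.2)

-- ===== PORT B =====
-- B: firsts once, ordered dedup of the keys, then one filter pass per distinct key.
def build_class_table_alt (samples : List (List Int)) : (List (Int × List (List Int))) × List Int :=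
  let firsts := samples.map (fun s => (PySem.List.pyGet? s 0).getD 0)
  let order := PySem.List.dedup firsts
  let data_set := order.map (fun k => (k, ((firsts.zip samples).filter (fun p => p.1 == k)).map (·.2)))
  (data_set, PySem.Set.ofList order)

-- ===== PRECONDITION & SPEC =====
-- Pre_ excludes only samples lists containing an empty sample, on which both A and B raise IndexError at sample[0].
def Pre_build_class_table (samples : List (List Int)) : Prop := ∀ s ∈ samples, s ≠ []
instance (samples : List (List Int)) : Decidable (Pre_build_class_table samples) := by unfold Pre_build_class_table; infer_instance
def pvWitness_build_class_table : List (List Int) := [[1, 2], [2, 3], [1, 4]]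
def Spec_build_class_table (samples : List (List Int)) (out : (List (Int × List (List Int))) × List Int) : Prop := out = build_class_table_alt samples
instance (samples : List (List Int)) (out : (List (Int × List (List Int))) × List Int) : Decidable (Spec_build_class_table samples out) := by unfold Spec_build_class_table; infer_instance

-- ===== CLAIM (what is proved, stated in full; the proofs are below) =====
def Claim_equal_build_class_table : Prop := ∀ (samples : List (List Int)), Dom_build_class_table samples → Pre_build_class_table samples → Spec_build_class_table samples (build_class_table samples)

-- ===== LEMMAS AND PROOFS =====

-- the key both programs compute from a sample
def pvKey (s : List Int) : Int := (PySem.List.pyGet? s 0).getD 0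

lemma pvModify_eq_insert (d : PySem.Dict Int (List (List Int))) (k : Int) (f : List (List Int) → List (List Int)) :
    d.modify k [] f = d.insert k (f (d.getD k [])) := by
  simp [PySem.Dict.modify, PySem.Dict.insert, PySem.Dict.getD]

-- A's paired fold splits into a dict fold and a set fold
lemma pvFold_split (l : List (List Int)) (d : PySem.Dict Int (List (List Int))) (s : PySem.Set Int) :
    l.foldl
      (fun (acc : PySem.Dict Int (List (List Int)) × PySem.Set Int) sample =>
        let key : Int := (PySem.List.pyGet? sample 0).getD 0
        let keys := PySem.Set.add acc.2 key
        let d := acc.1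
        if d.contains key then (d.insert key (d.getD key [] ++ [sample]), keys)
        else (d.insert key [sample], keys)) (d, s)
    = (l.foldl (fun d sample => d.modify (pvKey sample) [] (· ++ [sample])) d,
       l.foldl (fun s sample => PySem.Set.add s (pvKey sample)) s) := by
  induction l generalizing d s with
  | nil => rfl
  | cons x xs ih =>
      simp only [List.foldl_cons]
      rw [← ih]
      congr 1
      rw [pvModify_eq_insert]
      simp only [pvKey]
      by_cases h : d.contains ((PySem.List.pyGet? x 0).getD 0)
      · simp [h]
      · simp [h, PySem.Dict.getD_of_not_contains]

lemma pvZip_map_self (l : List (List Int)) :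
    (l.map pvKey).zip l = l.map (fun s => (pvKey s, s)) := by
  induction l with
  | nil => rfl
  | cons x xs ih => simp [ih]

-- ===== VERDICT (by name: the statement is the Claim_ definition above) =====
theorem build_class_table_spec : Claim_equal_build_class_table := by
  intro samples _ _
  unfold Spec_build_class_table build_class_table build_class_table_alt
  simp only []
  rw [pvFold_split]
  have hmap : samples.foldl (fun d sample => d.modify (pvKey sample) [] (· ++ [sample])) PySem.Dict.empty
      = (samples.map (fun s => (pvKey s, s))).foldl (fun d p => d.modify p.1 [] (· ++ [p.2])) PySem.Dict.empty := by
    rw [List.foldl_map]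
  have hkeys : (samples.foldl (fun d sample => d.modify (pvKey sample) [] (· ++ [sample])) PySem.Dict.empty).keys
      = PySem.Set.ofList (samples.map pvKey) := by
    rw [PySem.Dict.keys_foldl_modify_key]
    simp [PySem.Set.update_nil_left, PySem.Dict.keys_empty]
  have hnodup : (samples.foldl (fun d sample => d.modify (pvKey sample) [] (· ++ [sample])) PySem.Dict.empty).keys.Nodup := by
    rw [hkeys]; exact PySem.Set.nodup_ofList _
  have hitems := PySem.Dict.items_eq_map_keys
      (samples.foldl (fun d sample => d.modify (pvKey sample) [] (· ++ [sample])) PySem.Dict.empty) hnodup ([] : List (List Int))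
  rw [show (fun (s : List Int) => (PySem.List.pyGet? s 0).getD 0) = pvKey from rfl]
  simp only [Prod.mk.injEq]
  constructor
  · -- dict component
    rw [hitems, hkeys]
    rw [pvZip_map_self samples]
    simp only [PySem.List.dedup_eq_ofList]
    apply List.map_congr_left
    intro k hk
    congr 1
    rw [hmap, PySem.Dict.getD_foldl_modify_append]
    simp [PySem.Dict.getD_empty]
  · -- set component
    rw [PySem.List.dedup_eq_ofList, PySem.Set.ofList_ofList, PySem.Set.ofList_eq_foldl, List.foldl_map]
    rfl
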